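-- pv_equiv track=rewrite | github.com/Aleksbielarus/PyDQE | Module_2.py | split_dict_from_list
-- ===== SOURCE A (Python) =====
-- def split_dict_from_list(dict_list):
--     # create set of keys
--     all_keys = set().union(*(d.keys() for d in dict_list))
--     result_dict = {}
--     # keys iteration
--     for key in all_keys:
--         max_value = 0
--         key_index = 0
--         update = 0  # kostyl
--         # dict iterate
--         for dct in range(0, len(dict_list)):
--             # keys and values iteration
--             for k, v in dict_list[dct].items():
--                 if k == key:
--                     update += 1
--                     if v >= max_value:
--                         key_index = dct + 1
--                         max_value = v
--         if update == 1:
--             result_dict.update({str(key): max_value})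
--         elif update > 1:
--             result_dict.update({str(key) + '_' + str(key_index): max_value})
--     return result_dict
-- ===== SOURCE B (Python) =====
-- def split_dict_from_list(dict_list):
--     # One pass over all entries, aggregating (count, running max-vs-0, index of last max) per key.
--     agg = {}
--     for i, d in enumerate(dict_list, 1):
--         for k, v in d.items():
--             c, m, idx = agg.get(k, (0, 0, 0))
--             agg[k] = (c + 1, v, i) if v >= m else (c + 1, m, idx)
--     result = {}
--     for k, (c, m, idx) in agg.items():
--         result[k if c == 1 else k + '_' + str(idx)] = m
--     return result
-- ===== Notes on version B (the rewrite author's own statement) =====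
-- stated objective: faster
-- what changed: A scans the whole flattened input once per distinct key (outer loop over the key set, inner loop over every entry); B makes a single pass over all entries, aggregating a (count, max, index) triple per key in one dict, then emits the result.
import Mathlib
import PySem

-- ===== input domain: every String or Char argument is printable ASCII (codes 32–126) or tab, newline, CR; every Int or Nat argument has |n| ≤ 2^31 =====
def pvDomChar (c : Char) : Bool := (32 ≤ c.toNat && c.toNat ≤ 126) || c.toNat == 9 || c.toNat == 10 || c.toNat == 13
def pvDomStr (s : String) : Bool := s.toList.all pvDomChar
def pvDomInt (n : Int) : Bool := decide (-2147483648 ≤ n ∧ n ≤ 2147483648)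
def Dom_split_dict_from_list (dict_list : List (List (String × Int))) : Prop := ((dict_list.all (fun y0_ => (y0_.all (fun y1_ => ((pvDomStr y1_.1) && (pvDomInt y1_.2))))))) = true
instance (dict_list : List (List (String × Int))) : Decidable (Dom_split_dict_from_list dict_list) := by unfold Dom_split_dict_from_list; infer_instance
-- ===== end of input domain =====

-- B replaces A's per-key rescans of the whole input (O(K*N)) by a single aggregating pass
-- over all entries (O(N)); proved to return the same dict on every input.

-- ===== PORT A =====
-- literal port of A: outer loop over the set of all keys, inner double loop over all dicts' items
def pvAStep (key : String) (dct : Int) (st : Int × Int × Int) (kv : String × Int) : Int × Int × Int :=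
  if kv.1 == key then
    if kv.2 ≥ st.1 then (kv.2, dct + 1, st.2.2 + 1) else (st.1, st.2.1, st.2.2 + 1)
  else st

def split_dict_from_list (dict_list : List (List (String × Int))) : List (String × Int) :=
  let all_keys : PySem.Set String :=
    dict_list.foldl (fun s d => PySem.Set.union s (d.map Prod.fst)) PySem.Set.empty
  let result : PySem.Dict String Int :=
    all_keys.foldl (fun rd key =>
      let r : Int × Int × Int :=
        (PySem.List.pyRange 0 (PySem.List.len dict_list) 1).foldl
          (fun st dct => (PySem.List.pyGetD dict_list dct []).foldl (pvAStep key dct) st)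
          (0, 0, 0)
      if r.2.2 == 1 then rd.insert key r.1
      else if r.2.2 > 1 then rd.insert (key ++ "_" ++ PySem.Int.toStr r.2.1) r.1
      else rd) PySem.Dict.empty
  result.items

-- ===== PORT B =====
-- port of B: one pass over all entries, per-key (count, max, index) triple in a dict
def pvBStep (i : Int) (agg : PySem.Dict String (Int × Int × Int)) (kv : String × Int) :
    PySem.Dict String (Int × Int × Int) :=
  agg.insert kv.1
    (let t := agg.getD kv.1 (0, 0, 0)
     if kv.2 ≥ t.2.1 then (t.1 + 1, kv.2, i) else (t.1 + 1, t.2.1, t.2.2))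

def split_dict_from_list_alt (dict_list : List (List (String × Int))) : List (String × Int) :=
  let agg : PySem.Dict String (Int × Int × Int) :=
    (PySem.List.enumerate dict_list 1).foldl
      (fun agg p => p.2.foldl (pvBStep p.1) agg) PySem.Dict.empty
  let result : PySem.Dict String Int :=
    agg.items.foldl
      (fun rd p =>
        rd.insert (if p.2.1 == 1 then p.1 else p.1 ++ "_" ++ PySem.Int.toStr p.2.2.2) p.2.2.1)
      PySem.Dict.empty
  result.items

-- ===== PRECONDITION & SPEC =====
def Spec_split_dict_from_list (dict_list : List (List (String × Int))) (out : List (String × Int)) : Prop := out = split_dict_from_list_alt dict_list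
instance (dict_list : List (List (String × Int))) (out : List (String × Int)) : Decidable (Spec_split_dict_from_list dict_list out) := by unfold Spec_split_dict_from_list; infer_instance

-- ===== CLAIM (what is proved, stated in full; the proofs are below) =====
def Claim_equal_split_dict_from_list : Prop := ∀ (dict_list : List (List (String × Int))), Dom_split_dict_from_list dict_list → Spec_split_dict_from_list dict_list (split_dict_from_list dict_list)

-- ===== LEMMAS AND PROOFS =====

-- the input flattened to (1-based dict index, entry) pairs, in traversal order
def pvFlat (dict_list : List (List (String × Int))) : List (Int × (String × Int)) :=
  (PySem.List.enumerate dict_list 1).flatMap (fun p => p.2.map (fun kv => (p.1, kv)))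

-- B's per-key update, restricted to one key, as a fold over pvFlat
def pvUpd (key : String) (st : Int × Int × Int) (q : Int × (String × Int)) : Int × Int × Int :=
  if q.2.1 == key then
    (if q.2.2 ≥ st.2.1 then (st.1 + 1, q.2.2, q.1) else (st.1 + 1, st.2.1, st.2.2))
  else st

-- reorder (count, max, idx) into A's (max, idx, count)
def pvPhi (t : Int × Int × Int) : Int × Int × Int := (t.2.1, t.2.2, t.1)

def pvAgg (dict_list : List (List (String × Int))) : PySem.Dict String (Int × Int × Int) :=
  (PySem.List.enumerate dict_list 1).foldl (fun agg p => p.2.foldl (pvBStep p.1) agg) PySem.Dict.empty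

lemma pvAgg_eq_foldl_flat (dict_list : List (List (String × Int))) :
    pvAgg dict_list = (pvFlat dict_list).foldl (fun a q => pvBStep q.1 a q.2) PySem.Dict.empty := by
  unfold pvAgg pvFlat
  have h : ∀ (L : List (Int × List (String × Int))) (a : PySem.Dict String (Int × Int × Int)),
      L.foldl (fun agg p => p.2.foldl (pvBStep p.1) agg) a
        = (L.flatMap (fun p => p.2.map (fun kv => (p.1, kv)))).foldl (fun a q => pvBStep q.1 a q.2) a := by
    intro L
    induction L with
    | nil => intro a; simp
    | cons p L ih =>
      intro a
      simp only [List.foldl_cons, List.flatMap_cons, List.foldl_append, List.foldl_map, ih]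
  exact h _ _

lemma pvGetD_foldl (key : String) :
    ∀ (l : List (Int × (String × Int))) (agg : PySem.Dict String (Int × Int × Int)),
      (l.foldl (fun a q => pvBStep q.1 a q.2) agg).getD key (0, 0, 0)
        = l.foldl (pvUpd key) (agg.getD key (0, 0, 0)) := by
  intro l
  induction l with
  | nil => intro agg; simp
  | cons q l ih =>
    intro agg
    simp only [List.foldl_cons, ih]
    congr 1
    simp only [pvBStep, pvUpd, PySem.Dict.getD_insert]
    by_cases h : key = q.2.1
    · subst h; simp
    · simp [h, Ne.symm h, beq_iff_eq]

lemma pvAgg_getD (dict_list : List (List (String × Int))) (key : String) :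
    (pvAgg dict_list).getD key (0, 0, 0) = (pvFlat dict_list).foldl (pvUpd key) (0, 0, 0) := by
  rw [pvAgg_eq_foldl_flat, pvGetD_foldl, PySem.Dict.getD_empty]

-- A's inner double loop equals the (reordered) per-key fold over pvFlat
lemma pvAInner_eq (dict_list : List (List (String × Int))) (key : String) :
    (PySem.List.pyRange 0 (PySem.List.len dict_list) 1).foldl
        (fun st dct => (PySem.List.pyGetD dict_list dct []).foldl (pvAStep key dct) st) (0, 0, 0)
      = pvPhi ((pvFlat dict_list).foldl (pvUpd key) (0, 0, 0)) := by
  have hshift : ∀ (xs : List (List (String × Int))) (n : Int),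
      PySem.List.enumerate xs (n + 1) = (PySem.List.enumerate xs n).map (fun p => (p.1 + 1, p.2)) := by
    intro xs
    induction xs with
    | nil => intro n; simp [PySem.List.enumerate_nil]
    | cons d xs ih => intro n; simp [PySem.List.enumerate_cons, ih]
  have hrange : (PySem.List.pyRange 0 (PySem.List.len dict_list) 1).foldl
      (fun st dct => (PySem.List.pyGetD dict_list dct []).foldl (pvAStep key dct) st) (0, 0, 0)
      = (PySem.List.enumerate dict_list 0).foldl
          (fun st p => p.2.foldl (pvAStep key p.1) st) ((0, 0, 0) : Int × Int × Int) := by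
    rw [PySem.List.enumerate_eq_map_pyRange (d := ([] : List (String × Int))), List.foldl_map]
  rw [hrange]
  have hflat : ∀ (L : List (Int × List (String × Int))) (st : Int × Int × Int),
      L.foldl (fun st p => p.2.foldl (pvAStep key p.1) st) st
        = (L.flatMap (fun p => p.2.map (fun kv => (p.1, kv)))).foldl
            (fun st q => pvAStep key q.1 st q.2) st := by
    intro L
    induction L with
    | nil => intro st; simp
    | cons p L ih =>
      intro st
      simp only [List.foldl_cons, List.flatMap_cons, List.foldl_append, List.foldl_map, ih]
  rw [hflat]
  have hmap : pvFlat dict_list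
      = ((PySem.List.enumerate dict_list 0).flatMap (fun p => p.2.map (fun kv => (p.1, kv)))).map
          (fun q => (q.1 + 1, q.2)) := by
    unfold pvFlat
    rw [show (1 : Int) = 0 + 1 by ring, hshift, List.flatMap_map, List.map_flatMap]
    congr 1
    funext p
    simp [List.map_map, Function.comp]
  rw [hmap, List.foldl_map]
  have hstep : ∀ (t : Int × Int × Int) (q : Int × (String × Int)),
      pvAStep key q.1 (pvPhi t) q.2 = pvPhi (pvUpd key t (q.1 + 1, q.2)) := by
    intro t q
    unfold pvAStep pvUpd pvPhi
    by_cases h : q.2.1 == key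
    · simp only [h, if_true]
      split <;> rfl
    · simp [h]
  have hfold : ∀ (l : List (Int × (String × Int))) (t : Int × Int × Int),
      l.foldl (fun st q => pvAStep key q.1 st q.2) (pvPhi t)
        = pvPhi (l.foldl (fun st q => pvUpd key st (q.1 + 1, q.2)) t) := by
    intro l
    induction l with
    | nil => intro t; rfl
    | cons q l ih => intro t; simp only [List.foldl_cons, hstep, ih]
  exact hfold _ (0, 0, 0)

lemma pvAllKeys_eq (dict_list : List (List (String × Int))) :
    dict_list.foldl (fun s d => PySem.Set.union s (d.map Prod.fst)) PySem.Set.empty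
      = PySem.Set.ofList ((pvFlat dict_list).map (fun q => q.2.1)) := by
  have h : ∀ (L : List (Int × List (String × Int))) (s : PySem.Set String),
      L.foldl (fun s p => PySem.Set.union s (p.2.map Prod.fst)) s
        = PySem.Set.update s
            ((L.flatMap (fun p => p.2.map (fun kv => (p.1, kv)))).map (fun q => q.2.1)) := by
    intro L
    induction L with
    | nil => intro s; simp [PySem.Set.update]
    | cons p L ih =>
      intro s
      simp only [List.foldl_cons, List.flatMap_cons, List.map_append, PySem.Set.update_append, ih,
        List.map_map]
      rfl
  have hm : dict_list.foldl (fun s d => PySem.Set.union s (d.map Prod.fst)) PySem.Set.empty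
      = (PySem.List.enumerate dict_list 1).foldl
          (fun s p => PySem.Set.union s (p.2.map Prod.fst)) PySem.Set.empty := by
    conv_lhs => rw [← PySem.List.map_snd_enumerate dict_list 1]
    rw [List.foldl_map]
  rw [hm, h]
  rfl

lemma pvAgg_keys (dict_list : List (List (String × Int))) :
    (pvAgg dict_list).keys = PySem.Set.ofList ((pvFlat dict_list).map (fun q => q.2.1)) := by
  rw [pvAgg_eq_foldl_flat]
  rw [show (fun (a : PySem.Dict String (Int × Int × Int)) (q : Int × (String × Int)) => pvBStep q.1 a q.2)
      = (fun a q => a.insert q.2.1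
          (let t := a.getD q.2.1 (0, 0, 0)
           if q.2.2 ≥ t.2.1 then (t.1 + 1, q.2.2, q.1) else (t.1 + 1, t.2.1, t.2.2))) from rfl]
  rw [PySem.Dict.keys_foldl_insert_key]
  simp [PySem.Set.update_nil_left]

lemma pvCount_fst (key : String) :
    ∀ (l : List (Int × (String × Int))) (st : Int × Int × Int),
      (l.foldl (pvUpd key) st).1 = st.1 + (l.countP (fun q => q.2.1 == key) : Int) := by
  intro l
  induction l with
  | nil => intro st; simp
  | cons q l ih =>
    intro st
    simp only [List.foldl_cons, ih, List.countP_cons]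
    unfold pvUpd
    by_cases h : q.2.1 == key
    · simp only [h, if_true]
      split <;> simp <;> ring
    · simp [h]

-- ===== VERDICT (by name: the statement is the Claim_ definition above) =====
theorem split_dict_from_list_spec : Claim_equal_split_dict_from_list := by
  intro dict_list _hdom
  unfold Spec_split_dict_from_list
  simp only [split_dict_from_list, split_dict_from_list_alt]
  congr 1
  rw [show ((PySem.List.enumerate dict_list 1).foldl
        (fun agg p => p.2.foldl (pvBStep p.1) agg) PySem.Dict.empty) = pvAgg dict_list from rfl]
  have hnodup : (pvAgg dict_list).keys.Nodup := by
    rw [pvAgg_keys]; exact PySem.Set.nodup_ofList _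
  rw [PySem.Dict.items_eq_map_keys (pvAgg dict_list) hnodup ((0, 0, 0) : Int × Int × Int),
    List.foldl_map, pvAllKeys_eq, ← pvAgg_keys]
  apply PySem.List.foldl_congr_mem
  intro rd key hk
  have hc : 1 ≤ ((pvAgg dict_list).getD key (0, 0, 0)).1 := by
    rw [pvAgg_getD, pvCount_fst]
    rw [pvAgg_keys] at hk
    have hmem := (PySem.Set.mem_ofList _ _).mp hk
    obtain ⟨q, hq, hq2⟩ := List.mem_map.mp hmem
    have hpos : 0 < (pvFlat dict_list).countP (fun q => q.2.1 == key) :=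
      List.countP_pos_iff.mpr ⟨q, hq, by simp [hq2]⟩
    omega
  simp only [pvAInner_eq, ← pvAgg_getD, pvPhi]
  by_cases ht : ((pvAgg dict_list).getD key (0, 0, 0)).1 = 1
  · simp [ht]
  · have ht2 : ((pvAgg dict_list).getD key (0, 0, 0)).1 > 1 := by omega
    simp only [beq_iff_eq, ht, if_false]
    rw [if_pos ht2]
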